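-- pv_equiv track=rewrite | github.com/pdsykes2512/surg-db | execution/data-fixes/fix_procedure_names_and_opcs4.py | map_procedure_name_and_opcs4
-- ===== SOURCE A (Python) =====
-- from typing import Optional
--
-- def map_procedure_name_and_opcs4(proc_name: str, existing_opcs4: Optional[str] = None) -> tuple[Optional[str], Optional[str]]:
--     """
--     Map procedure name to canonical name and OPCS4 code
--
--     Returns:
--         Tuple of (canonical_procedure_name, opcs4_code)
--     """
--     if not proc_name or proc_name == 'nan':
--         return None, existing_opcs4
--
--     proc_clean = proc_name.strip().lower()
--
--     # Comprehensive mapping from source data variations to canonical names and OPCS4 codes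
--     # Format: source_name_pattern → (canonical_name, default_opcs4_code)
--     procedure_mapping = {
--         # Colorectal procedures
--         'anterior resection': ('Anterior resection of rectum', 'H33.4'),
--         'right hemicolectomy': ('Right hemicolectomy', 'H07.9'),
--         'extended right hemicolectomy': ('Extended right hemicolectomy', 'H06.9'),
--         'left hemicolectomy': ('Left hemicolectomy', 'H09.9'),
--         'sigmoid colectomy': ('Sigmoid colectomy', 'H10.9'),
--         'transverse colectomy': ('Transverse colectomy', 'H07.9'),
--         'hartmann': ('Hartmann procedure', 'H33.5'),
--         'aper': ('Abdominoperineal excision of rectum', 'H33.1'),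
--         'abdominoperineal': ('Abdominoperineal excision of rectum', 'H33.1'),
--         'subtotal colectomy': ('Subtotal colectomy', 'H08.9'),
--         'total colectomy': ('Total colectomy', 'H09.9'),
--         'proctocolectomy': ('Proctocolectomy', 'H10.9'),
--         'panproctocolectomy': ('Panproctocolectomy', 'H11.9'),
--
--         # Stoma procedures
--         'stoma only': ('Stoma formation', 'H15.9'),
--         'stoma': ('Stoma formation', 'H15.9'),
--         'ileostomy': ('Ileostomy', 'H46.9'),
--         'colostomy': ('Colostomy', 'H47.9'),
--         'closure of stoma': ('Closure of stoma', 'H48.9'),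
--
--         # Endoscopic/minimal access
--         'polypectomy': ('Polypectomy', 'H23.9'),
--         'tems': ('Transanal endoscopic microsurgery', 'H41.2'),
--         'trans anal resection': ('Transanal excision of lesion', 'H41.1'),
--         'transanal resection': ('Transanal excision of lesion', 'H41.1'),
--
--         # Other/palliative
--         'stent': ('Colorectal stent insertion', 'H24.3'),
--         'bypass': ('Intestinal bypass', 'H05.1'),
--         'laparotomy only': ('Laparotomy and exploration', 'T30.1'),
--         'laparoscopy only': ('Diagnostic laparoscopy', 'T42.1'),
--         'other': ('Other colorectal procedure', 'H99.9'),
--     }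
--
--     # Try to find a match - sort by pattern length (longest first) to check specific patterns before generic ones
--     for pattern in sorted(procedure_mapping.keys(), key=len, reverse=True):
--         if pattern in proc_clean:
--             canonical_name, default_opcs4 = procedure_mapping[pattern]
--             # Use existing OPCS4 if available and valid, otherwise use default
--             opcs4 = existing_opcs4 if (existing_opcs4 and existing_opcs4 != 'nan' and existing_opcs4 != '') else default_opcs4
--             return canonical_name, opcs4
--
--     # If no match found, return cleaned version of original name
--     return proc_name.strip(), existing_opcs4
-- ===== SOURCE B (Python) =====
-- from typing import Optional
--
-- def map_procedure_name_and_opcs4(proc_name: str, existing_opcs4: Optional[str] = None) -> tuple[Optional[str], Optional[str]]: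
--     """Map procedure name to canonical name and OPCS4 code.
--
--     Single pass over the mapping in insertion order, keeping the longest
--     matching pattern (strict > so the first pattern wins ties, which is what
--     a stable longest-first sort would pick) -- no per-call sort needed.
--     """
--     if not proc_name or proc_name == 'nan':
--         return None, existing_opcs4
--
--     proc_clean = proc_name.strip().lower()
--
--     best = None  # (pattern, canonical_name, default_opcs4) with the longest matching pattern
--     for pattern, (canonical_name, default_opcs4) in _PROCEDURE_MAPPING.items():
--         if pattern in proc_clean and (best is None or len(pattern) > len(best[0])):
--             best = (pattern, canonical_name, default_opcs4)
--
--     if best is None: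
--         return proc_name.strip(), existing_opcs4
--
--     _, canonical_name, default_opcs4 = best
--     opcs4 = existing_opcs4 if (existing_opcs4 and existing_opcs4 != 'nan') else default_opcs4
--     return canonical_name, opcs4
--
--
-- _PROCEDURE_MAPPING = {
--     'anterior resection': ('Anterior resection of rectum', 'H33.4'),
--     'right hemicolectomy': ('Right hemicolectomy', 'H07.9'),
--     'extended right hemicolectomy': ('Extended right hemicolectomy', 'H06.9'),
--     'left hemicolectomy': ('Left hemicolectomy', 'H09.9'),
--     'sigmoid colectomy': ('Sigmoid colectomy', 'H10.9'),
--     'transverse colectomy': ('Transverse colectomy', 'H07.9'),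
--     'hartmann': ('Hartmann procedure', 'H33.5'),
--     'aper': ('Abdominoperineal excision of rectum', 'H33.1'),
--     'abdominoperineal': ('Abdominoperineal excision of rectum', 'H33.1'),
--     'subtotal colectomy': ('Subtotal colectomy', 'H08.9'),
--     'total colectomy': ('Total colectomy', 'H09.9'),
--     'proctocolectomy': ('Proctocolectomy', 'H10.9'),
--     'panproctocolectomy': ('Panproctocolectomy', 'H11.9'),
--     'stoma only': ('Stoma formation', 'H15.9'),
--     'stoma': ('Stoma formation', 'H15.9'),
--     'ileostomy': ('Ileostomy', 'H46.9'),
--     'colostomy': ('Colostomy', 'H47.9'),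
--     'closure of stoma': ('Closure of stoma', 'H48.9'),
--     'polypectomy': ('Polypectomy', 'H23.9'),
--     'tems': ('Transanal endoscopic microsurgery', 'H41.2'),
--     'trans anal resection': ('Transanal excision of lesion', 'H41.1'),
--     'transanal resection': ('Transanal excision of lesion', 'H41.1'),
--     'stent': ('Colorectal stent insertion', 'H24.3'),
--     'bypass': ('Intestinal bypass', 'H05.1'),
--     'laparotomy only': ('Laparotomy and exploration', 'T30.1'),
--     'laparoscopy only': ('Diagnostic laparoscopy', 'T42.1'),
--     'other': ('Other colorectal procedure', 'H99.9'),
-- }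
-- ===== Notes on version B (the rewrite author's own statement) =====
-- stated objective: simpler
-- what changed: B drops A's per-call sorted(keys, key=len, reverse=True) scan and instead makes one pass over the mapping in insertion order keeping the longest matching pattern (strict >, so the first pattern wins ties exactly as the stable sort would).
import Mathlib
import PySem

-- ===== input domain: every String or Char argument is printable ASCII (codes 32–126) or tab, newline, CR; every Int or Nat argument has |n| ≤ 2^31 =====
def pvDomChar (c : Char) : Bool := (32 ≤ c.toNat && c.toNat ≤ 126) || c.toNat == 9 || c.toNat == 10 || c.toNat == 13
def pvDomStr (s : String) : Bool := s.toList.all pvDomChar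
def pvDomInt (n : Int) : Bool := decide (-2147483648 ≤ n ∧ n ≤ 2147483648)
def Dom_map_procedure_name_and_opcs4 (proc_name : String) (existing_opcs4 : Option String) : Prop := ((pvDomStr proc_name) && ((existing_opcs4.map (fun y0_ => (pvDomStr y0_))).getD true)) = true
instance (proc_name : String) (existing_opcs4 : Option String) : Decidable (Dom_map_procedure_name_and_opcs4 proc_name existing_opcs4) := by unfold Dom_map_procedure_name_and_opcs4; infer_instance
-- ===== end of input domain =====

-- B replaces A's per-call sort of the pattern keys by a single insertion-order pass that
-- keeps the longest matching pattern (strict >, so the first pattern wins ties, exactly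
-- like the stable longest-first sort): simpler and no sorting work per call.


-- ===== PORT A =====
-- the module-level mapping: pattern ↦ (canonical_name, default_opcs4), insertion order
def pvMapping : PySem.Dict String (String × String) := PySem.Dict.ofList [
  ("anterior resection", ("Anterior resection of rectum", "H33.4")),
  ("right hemicolectomy", ("Right hemicolectomy", "H07.9")),
  ("extended right hemicolectomy", ("Extended right hemicolectomy", "H06.9")),
  ("left hemicolectomy", ("Left hemicolectomy", "H09.9")),
  ("sigmoid colectomy", ("Sigmoid colectomy", "H10.9")),
  ("transverse colectomy", ("Transverse colectomy", "H07.9")),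
  ("hartmann", ("Hartmann procedure", "H33.5")),
  ("aper", ("Abdominoperineal excision of rectum", "H33.1")),
  ("abdominoperineal", ("Abdominoperineal excision of rectum", "H33.1")),
  ("subtotal colectomy", ("Subtotal colectomy", "H08.9")),
  ("total colectomy", ("Total colectomy", "H09.9")),
  ("proctocolectomy", ("Proctocolectomy", "H10.9")),
  ("panproctocolectomy", ("Panproctocolectomy", "H11.9")),
  ("stoma only", ("Stoma formation", "H15.9")),
  ("stoma", ("Stoma formation", "H15.9")),
  ("ileostomy", ("Ileostomy", "H46.9")),
  ("colostomy", ("Colostomy", "H47.9")),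
  ("closure of stoma", ("Closure of stoma", "H48.9")),
  ("polypectomy", ("Polypectomy", "H23.9")),
  ("tems", ("Transanal endoscopic microsurgery", "H41.2")),
  ("trans anal resection", ("Transanal excision of lesion", "H41.1")),
  ("transanal resection", ("Transanal excision of lesion", "H41.1")),
  ("stent", ("Colorectal stent insertion", "H24.3")),
  ("bypass", ("Intestinal bypass", "H05.1")),
  ("laparotomy only", ("Laparotomy and exploration", "T30.1")),
  ("laparoscopy only", ("Diagnostic laparoscopy", "T42.1")),
  ("other", ("Other colorectal procedure", "H99.9"))]

-- A: loop over the keys sorted by length, longest first; first substring match returns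
def map_procedure_name_and_opcs4 (proc_name : String) (existing_opcs4 : Option String) : Option String × Option String :=
  if proc_name == "" || proc_name == "nan" then (none, existing_opcs4)
  else
    let proc_clean := PySem.Str.lower (PySem.Str.strip proc_name)
    match (PySem.List.sorted (PySem.Dict.keys pvMapping) (fun k => PySem.Str.len k) true).find?
        (fun pattern => PySem.Str.isIn pattern proc_clean) with
    | some pattern =>
      match PySem.Dict.get? pvMapping pattern with
      | some (canonical_name, default_opcs4) =>
        let opcs4 : String := match existing_opcs4 with
          | some e => if e != "" && e != "nan" && e != "" then e else default_opcs4
          | none => default_opcs4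
        (some canonical_name, some opcs4)
      | none => (none, none)  -- unreachable: the found pattern is one of the dict's keys
    | none => (some (PySem.Str.strip proc_name), existing_opcs4)

-- ===== PORT B =====
-- B's loop body: keep the best (longest-pattern, strict >) matching entry seen so far
def pvBestStep {α : Type} (len : α → Int) (p : α → Bool) (acc : Option α) (x : α) : Option α :=
  if p x && (match acc with | none => true | some b => decide (len b < len x)) then some x else acc

-- B: one pass over the mapping in insertion order, no sort
def map_procedure_name_and_opcs4_alt (proc_name : String) (existing_opcs4 : Option String) : Option String × Option String :=
  if proc_name == "" || proc_name == "nan" then (none, existing_opcs4)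
  else
    let proc_clean := PySem.Str.lower (PySem.Str.strip proc_name)
    match pvMapping.items.foldl
        (pvBestStep (fun kv => PySem.Str.len kv.1) (fun kv => PySem.Str.isIn kv.1 proc_clean)) none with
    | some (_, canonical_name, default_opcs4) =>
      let opcs4 : String := match existing_opcs4 with
        | some e => if e != "" && e != "nan" then e else default_opcs4
        | none => default_opcs4
      (some canonical_name, some opcs4)
    | none => (some (PySem.Str.strip proc_name), existing_opcs4)

-- ===== PRECONDITION & SPEC =====
def Spec_map_procedure_name_and_opcs4 (proc_name : String) (existing_opcs4 : Option String) (out : Option String × Option String) : Prop := out = map_procedure_name_and_opcs4_alt proc_name existing_opcs4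
instance (proc_name : String) (existing_opcs4 : Option String) (out : Option String × Option String) : Decidable (Spec_map_procedure_name_and_opcs4 proc_name existing_opcs4 out) := by unfold Spec_map_procedure_name_and_opcs4; infer_instance

-- ===== CLAIM (what is proved, stated in full; the proofs are below) =====
def Claim_equal_map_procedure_name_and_opcs4 : Prop := ∀ (proc_name : String) (existing_opcs4 : Option String), Dom_map_procedure_name_and_opcs4 proc_name existing_opcs4 → Spec_map_procedure_name_and_opcs4 proc_name existing_opcs4 (map_procedure_name_and_opcs4 proc_name existing_opcs4)

-- ===== LEMMAS AND PROOFS =====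

-- inserting x into a length-descending list S and taking the first p-match
-- is the same as updating S's first p-match with x via pvBestStep
theorem pvFind_insertBy {α : Type} (len : α → Int) (p : α → Bool) (x : α) :
    ∀ (S : List α), S.Pairwise (fun a b => len b ≤ len a) →
      (PySem.List.insertBy (fun a b => decide (len b < len a)) x S).find? p
        = pvBestStep len p (S.find? p) x := by
  intro S
  induction S with
  | nil =>
    intro _
    by_cases hx : p x = true <;> simp [PySem.List.insertBy, pvBestStep, hx]
  | cons y ys ih =>
    intro hpw
    have hy : ∀ z ∈ ys, len z ≤ len y := (List.pairwise_cons.mp hpw).1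
    have htl := (List.pairwise_cons.mp hpw).2
    by_cases h : len y < len x
    · simp only [PySem.List.insertBy, decide_eq_true_eq, if_pos h]
      by_cases hx : p x = true
      · cases hfind : (y :: ys).find? p with
        | none => simp [List.find?, pvBestStep, hx]
        | some z =>
          have hz : z ∈ y :: ys := List.mem_of_find?_eq_some hfind
          have hzle : len z ≤ len y := by
            rcases List.mem_cons.mp hz with rfl | hz'
            · exact le_refl _
            · exact hy _ hz'
          simp [List.find?, pvBestStep, hx, lt_of_le_of_lt hzle h]
      · simp only [Bool.not_eq_true] at hx
        simp [List.find?, hx, pvBestStep]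
    · simp only [PySem.List.insertBy, decide_eq_true_eq, if_neg h]
      by_cases hyp : p y = true
      · have : ¬ len y < len x := h
        simp [List.find?, hyp, pvBestStep, this]
      · simp only [Bool.not_eq_true] at hyp
        simp [List.find?, hyp, ih htl]

-- first match in the length-descending stable sort = single-pass longest-match fold
theorem pvFind_sorted_eq_foldl_best {α : Type} (len : α → Int) (p : α → Bool) (l : List α) :
    (PySem.List.sorted l len true).find? p = l.foldl (pvBestStep len p) none := by
  induction l using List.reverseRecOn with
  | nil => simp [PySem.List.sorted_rev_eq_foldl_insertBy]
  | append_singleton l x ih =>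
    have hpw : (PySem.List.sorted l len true).Pairwise (fun a b => len b ≤ len a) :=
      PySem.List.sorted_pairwise_rev l len
    rw [PySem.List.sorted_rev_eq_foldl_insertBy] at hpw ih ⊢
    rw [List.foldl_append, List.foldl_append]
    simp only [List.foldl_cons, List.foldl_nil]
    rw [pvFind_insertBy len p x _ hpw, ih]

-- the fold over the mapped list is the mapped fold
theorem pvBestStep_map {α β : Type} (f : α → β) (len : β → Int) (p : β → Bool) :
    ∀ (l : List α) (acc : Option α),
      (l.map f).foldl (pvBestStep len p) (acc.map f)
        = (l.foldl (pvBestStep (fun a => len (f a)) (fun a => p (f a))) acc).map f := by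
  intro l
  induction l with
  | nil => intro acc; rfl
  | cons x l ih =>
    intro acc
    have hstep : pvBestStep len p (acc.map f) (f x)
        = (pvBestStep (fun a => len (f a)) (fun a => p (f a)) acc x).map f := by
      cases acc <;> (simp only [pvBestStep, Option.map_none, Option.map_some]; split_ifs <;> simp)
    simp only [List.map_cons, List.foldl_cons, hstep, ih]

-- the fold's result comes from the accumulator or the list
theorem pvBest_mem {α : Type} (len : α → Int) (p : α → Bool) :
    ∀ (l : List α) (acc : Option α) (r : α),
      l.foldl (pvBestStep len p) acc = some r → acc = some r ∨ r ∈ l := by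
  intro l
  induction l with
  | nil => intro acc r h; exact Or.inl h
  | cons x l ih =>
    intro acc r h
    rcases ih _ _ h with h' | h'
    · unfold pvBestStep at h'
      split_ifs at h' with hc
      · injection h' with h''; subst h''; exact Or.inr (List.mem_cons_self ..)
      · exact Or.inl h'
    · exact Or.inr (List.mem_cons_of_mem _ h')

-- concrete facts about pvMapping
theorem pvGet_of_mem : ∀ kv ∈ pvMapping.items, PySem.Dict.get? pvMapping kv.1 = some kv.2 := by decide

-- ===== VERDICT (by name: the statement is the Claim_ definition above) =====
theorem map_procedure_name_and_opcs4_spec : Claim_equal_map_procedure_name_and_opcs4 := by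
  intro proc_name existing_opcs4 _
  unfold Spec_map_procedure_name_and_opcs4
  unfold map_procedure_name_and_opcs4 map_procedure_name_and_opcs4_alt
  by_cases hguard : (proc_name == "" || proc_name == "nan") = true
  · rw [if_pos hguard, if_pos hguard]
  · have hg' : ¬ ((proc_name == "" || proc_name == "nan") = true) := hguard
    rw [if_neg hg', if_neg hg']
    dsimp only
    set pc := PySem.Str.lower (PySem.Str.strip proc_name) with hpc
    have hfind :
        (PySem.List.sorted (PySem.Dict.keys pvMapping) (fun k => PySem.Str.len k) true).find?
            (fun pattern => PySem.Str.isIn pattern pc)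
          = (pvMapping.items.foldl
              (pvBestStep (fun kv => PySem.Str.len kv.1) (fun kv => PySem.Str.isIn kv.1 pc))
              none).map Prod.fst := by
      rw [PySem.Dict.keys, pvFind_sorted_eq_foldl_best]
      have := pvBestStep_map (α := String × String × String) Prod.fst
        (fun k => PySem.Str.len k) (fun k => PySem.Str.isIn k pc) pvMapping.items none
      simpa using this
    rw [hfind]
    cases hfold : pvMapping.items.foldl
        (pvBestStep (fun kv => PySem.Str.len kv.1) (fun kv => PySem.Str.isIn kv.1 pc)) none with
    | none => simp
    | some kv =>
      have hmem : kv ∈ pvMapping.items := by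
        rcases pvBest_mem _ _ _ _ _ hfold with h | h
        · exact absurd h (by simp)
        · exact h
      obtain ⟨pat, canonical, default⟩ := kv
      have hget : PySem.Dict.get? pvMapping pat = some (canonical, default) := pvGet_of_mem _ hmem
      simp only [Option.map_some, hget]
      cases existing_opcs4 with
      | none => rfl
      | some e =>
        cases he : (e != "") <;> cases hn : (e != "nan") <;> simp [he, hn]
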